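-- pv_equiv track=rewrite | github.com/lmmontoya-ai/GamesBench | games_bench/games/sokoban/level_loader.py | count_levels_in_xsb
-- ===== SOURCE A (Python) =====
-- def count_levels_in_xsb(text: str) -> int:
--     count = 0
--     in_level = False
--     for line in text.splitlines():
--         stripped = line.strip()
--         if stripped.startswith(";"):
--             continue
--         if stripped == "":
--             if in_level:
--                 count += 1
--                 in_level = False
--             continue
--         in_level = True
--     if in_level:
--         count += 1
--     return count
-- ===== SOURCE B (Python) =====
-- def count_levels_in_xsb(text: str) -> int:
--     # Filter-then-scan: drop comment lines, map each kept line to a blank/content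
--     # flag, then count rising edges (content line whose predecessor was blank).
--     flags = [s != "" for s in (line.strip() for line in text.splitlines())
--              if not s.startswith(";")]
--     return sum(1 for prev, cur in zip([False] + flags, flags) if cur and not prev)
-- ===== Notes on version B (the rewrite author's own statement) =====
-- stated objective: idiomatic
-- what changed: Replaces A's explicit in_level state machine (with a post-loop fixup) by a filter-then-edge-count pass: comment lines are dropped, lines become blank/content flags, and the answer is the number of False->True transitions counted by zipping the flag list with itself shifted.
import Mathlib
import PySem

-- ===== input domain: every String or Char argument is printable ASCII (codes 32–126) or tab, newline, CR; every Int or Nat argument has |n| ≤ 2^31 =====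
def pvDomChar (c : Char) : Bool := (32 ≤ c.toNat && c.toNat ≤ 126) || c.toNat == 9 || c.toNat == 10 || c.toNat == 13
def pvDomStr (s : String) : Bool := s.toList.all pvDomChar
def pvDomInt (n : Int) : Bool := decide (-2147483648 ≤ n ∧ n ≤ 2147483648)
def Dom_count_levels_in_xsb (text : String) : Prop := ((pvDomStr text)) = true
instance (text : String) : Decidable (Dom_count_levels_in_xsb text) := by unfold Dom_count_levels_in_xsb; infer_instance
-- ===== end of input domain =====

-- B replaces A's explicit in_level state machine by a filter-then-edge-count pass (idiomatic; same cost).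

-- ===== PORT A =====
def count_levels_in_xsb (text : String) : Int :=
  let st := (PySem.Str.splitlines text).foldl (fun (st : Int × Bool) line =>
      let stripped := PySem.Str.strip line
      if PySem.Str.startswith stripped ";" then st
      else if stripped == "" then
        (if st.2 then (st.1 + 1, false) else st)
      else (st.1, true)) (0, false)
  if st.2 then st.1 + 1 else st.1

-- ===== PORT B =====
def count_levels_in_xsb_alt (text : String) : Int :=
  let flags := (PySem.Str.splitlines text).filterMap (fun line =>
      let s := PySem.Str.strip line
      if PySem.Str.startswith s ";" then none else some (s != ""))
  ((((false :: flags).zip flags).filter (fun p => p.2 && !p.1)).length : Int)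

-- ===== PRECONDITION & SPEC =====
def Spec_count_levels_in_xsb (text : String) (out : Int) : Prop := out = count_levels_in_xsb_alt text
instance (text : String) (out : Int) : Decidable (Spec_count_levels_in_xsb text out) := by unfold Spec_count_levels_in_xsb; infer_instance

-- ===== CLAIM (what is proved, stated in full; the proofs are below) =====
def Claim_equal_count_levels_in_xsb : Prop := ∀ (text : String), Dom_count_levels_in_xsb text → Spec_count_levels_in_xsb text (count_levels_in_xsb text)

-- ===== LEMMAS AND PROOFS =====

-- number of rising edges (content run starts) in a flag list, given the previous flag
def pvEdges : Bool → List Bool → Int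
  | _, [] => 0
  | b, f :: rest => (if f && !b then 1 else 0) + pvEdges f rest

theorem pvLoopA (ls : List String) (c : Int) (b : Bool) :
    (let st := ls.foldl (fun (st : Int × Bool) line =>
        let stripped := PySem.Str.strip line
        if PySem.Str.startswith stripped ";" then st
        else if stripped == "" then
          (if st.2 then (st.1 + 1, false) else st)
        else (st.1, true)) (c, b)
      if st.2 then st.1 + 1 else st.1)
    = (if b then c + 1 else c)
      + pvEdges b (ls.filterMap (fun line =>
          let s := PySem.Str.strip line
          if PySem.Str.startswith s ";" then none else some (s != ""))) := by
  induction ls generalizing c b with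
  | nil => simp [pvEdges]
  | cons line rest ih =>
    simp only [List.foldl_cons, List.filterMap_cons]
    by_cases h1 : PySem.Str.startswith (PySem.Str.strip line) ";"
    · simpa only [h1, if_true] using ih c b
    · simp only [h1, if_false, Bool.false_eq_true]
      by_cases h2 : (PySem.Str.strip line == "") = true
      · have hf : (PySem.Str.strip line != "") = false := by
          show (!(PySem.Str.strip line == "")) = false
          rw [h2]; rfl
        simp only [h2, if_true, hf]
        cases b with
        | false =>
          have h3 := ih c false
          simp only [pvEdges] at h3 ⊢
          simp at h3 ⊢
          omega
        | true =>
          have h3 := ih (c + 1) false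
          simp only [pvEdges] at h3 ⊢
          simp at h3 ⊢
          omega
      · have hf : (PySem.Str.strip line != "") = true := by
          show (!(PySem.Str.strip line == "")) = true
          rw [Bool.not_eq_true']
          exact Bool.eq_false_iff.mpr h2
        simp only [if_neg h2, hf]
        have h3 := ih c true
        cases b <;> simp only [pvEdges] at h3 ⊢ <;> simp at h3 ⊢ <;> omega
theorem pvZipCount (b : Bool) (fl : List Bool) :
    ((((b :: fl).zip fl).filter (fun p => p.2 && !p.1)).length : Int) = pvEdges b fl := by
  induction fl generalizing b with
  | nil => simp [pvEdges]
  | cons f rest ih =>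
    simp only [List.zip_cons_cons, List.filter_cons, pvEdges]
    by_cases h : (f && !b) = true
    · simp only [h, if_true, List.length_cons, ← ih f]; push_cast; ring
    · simp [h, ← ih f]

-- ===== VERDICT (by name: the statement is the Claim_ definition above) =====
theorem count_levels_in_xsb_spec : Claim_equal_count_levels_in_xsb := by
  intro text _
  unfold Spec_count_levels_in_xsb count_levels_in_xsb count_levels_in_xsb_alt
  rw [pvZipCount]
  simpa using pvLoopA (PySem.Str.splitlines text) 0 false
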